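-- pv_equiv track=rewrite | github.com/Laurentiu1986/Google-Foobar-Challenge | Level 2/lovely-lucky-lambs.py | solution
-- ===== SOURCE A (Python) =====
-- def solution(total_lambs):
--     total = 1   #total of lambs given
--     current = 1    #current henchman
--     minimum_hench = 1    #number of henchmen
--
--     #pre-calculate the number of LAMBs given in the first iteration
--     #here, 'total' will be the first henchman's number of LAMBs  gathered with the previous total
--     total = current + total*2
--
--     while total <= total_lambs:   #execute while 'total' is under 'total_lambs'
--         current = current*2     #rule no. 2; for the current henchman, we'll double the number of LAMBs of the previous henchman
--         total = total + current*2   #sum the current 'total' with the next henchman's number of LAMBs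
--         minimum_hench += 1      #increment the number of henchmen for the generous strategy
--
--     maximum_hench = 1
--     last = 0
--     current = 1
--     total_lambs -= 1
--     while total_lambs > 0:
--         if total_lambs < last + current:
--             break
--         maximum_hench += 1  #increment the number of henchmen for the stingy strategy
--
--         #it looks like fibonacci series, so we'll always
--         #sum the current henchman with the previous number of LAMBs,
--         #then we'll assign last to the new current
--         current, last = current + last, current
--         total_lambs -= current   #decrease the amount of LAMBs
--
--     return maximum_hench - minimum_hench
-- ===== SOURCE B (Python) =====
-- def solution(total_lambs):
--     # minimum (generous) henchmen: total paid after n henchmen is 2^n - 1,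
--     # so the count is the bit length of total_lambs+1 minus 1, clamped to >= 1.
--     minimum_hench = max(1, max(total_lambs + 1, 1).bit_length() - 1)
--
--     # maximum (stingy) henchmen: pay Fibonacci amounts greedily.
--     maximum_hench = 1
--     rem = total_lambs - 1
--     x, y = 1, 2
--     while rem >= x:
--         rem -= x
--         maximum_hench += 1
--         x, y = y, x + y
--     return maximum_hench - minimum_hench
-- ===== Notes on version B (the rewrite author's own statement) =====
-- stated objective: alternative
-- what changed: The generous-strategy while-loop (doubling totals 2^n-1) is replaced by a closed-form bit-length computation of the minimum henchman count; the Fibonacci loop is rewritten as a plain greedy loop on the next payment.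
import Mathlib
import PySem

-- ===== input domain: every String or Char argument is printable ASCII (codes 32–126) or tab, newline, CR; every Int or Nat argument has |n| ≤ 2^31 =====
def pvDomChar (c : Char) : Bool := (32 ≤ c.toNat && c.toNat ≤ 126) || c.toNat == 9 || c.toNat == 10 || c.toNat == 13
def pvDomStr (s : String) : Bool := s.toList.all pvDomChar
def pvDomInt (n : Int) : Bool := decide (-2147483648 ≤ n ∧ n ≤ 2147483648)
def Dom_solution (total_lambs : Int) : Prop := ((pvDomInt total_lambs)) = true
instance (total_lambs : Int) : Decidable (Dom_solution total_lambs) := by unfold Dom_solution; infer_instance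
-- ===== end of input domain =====

-- B replaces A's doubling loop for the minimum count by a closed-form bit-length
-- formula and rewrites the Fibonacci loop greedily; same return value everywhere.

-- ===== PORT A =====
-- first while-loop of A (generous strategy); the proof arguments only witness
-- the invariant 1 ≤ current needed for termination, the computation is A's.
def aLoop1 (L current total mins : Int) (hc : 1 ≤ current) : Int :=
  if _h : total ≤ L then
    aLoop1 L (current * 2) (total + (current * 2) * 2) (mins + 1) (by omega)
  else mins
termination_by (L + 1 - total).toNat
decreasing_by omega

-- second while-loop of A (stingy / Fibonacci strategy)
def aLoop2 (L last current maxh : Int) (hl : 0 ≤ last) (hc : 1 ≤ current) : Int :=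
  if _h : L > 0 then
    if _h2 : L < last + current then maxh
    else aLoop2 (L - (current + last)) current (current + last) (maxh + 1) (by omega) (by omega)
  else maxh
termination_by L.toNat
decreasing_by omega

def solution (total_lambs : Int) : Int :=
  aLoop2 (total_lambs - 1) 0 1 1 (by omega) (by omega)
    - aLoop1 total_lambs 1 (1 + 1 * 2) 1 (by omega)

-- ===== PORT B =====
-- Python's int.bit_length, exact for the nonnegative arguments Source B uses
def pyBitLength (n : Int) : Int :=
  if n = 0 then 0 else ((Nat.log2 n.natAbs + 1 : Nat) : Int)

def bLoop (rem x y m : Int) (hx : 1 ≤ x) (hy : 1 ≤ y) : Int :=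
  if _h : x ≤ rem then
    bLoop (rem - x) y (x + y) (m + 1) (by omega) (by omega)
  else m
termination_by rem.toNat
decreasing_by omega

def solution_alt (total_lambs : Int) : Int :=
  bLoop (total_lambs - 1) 1 2 1 (by omega) (by omega)
    - max 1 (pyBitLength (max (total_lambs + 1) 1) - 1)

-- ===== PRECONDITION & SPEC =====
def Spec_solution (total_lambs : Int) (out : Int) : Prop := out = solution_alt total_lambs
instance (total_lambs : Int) (out : Int) : Decidable (Spec_solution total_lambs out) := by unfold Spec_solution; infer_instance

-- ===== CLAIM (what is proved, stated in full; the proofs are below) =====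
def Claim_equal_solution : Prop := ∀ (total_lambs : Int), Dom_solution total_lambs → Spec_solution total_lambs (solution total_lambs)

-- ===== LEMMAS AND PROOFS =====

-- characterization of A's first loop: from the state reached after m accepted
-- steps (current = 2^(m-1), total = 2^(m+1)-1) it returns max m (log2 (L+1)).
lemma aLoop1_char (k : Nat) : ∀ (L : Int) (m : Nat) (hm : 1 ≤ m) (hc : (1:Int) ≤ 2^(m-1)),
    (L + 2 - 2^(m+1)).toNat ≤ k →
    aLoop1 L (2^(m-1)) (2^(m+1) - 1) (m : Int) hc
      = ((max m (Nat.log2 (max (L + 1) 1).toNat) : Nat) : Int) := by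
  induction k with
  | zero =>
    intro L m hm hc hk
    have hp1 : (1:Int) ≤ 2 ^ (m+1) := one_le_pow₀ (by norm_num)
    rw [aLoop1]
    split
    · exfalso; rename_i h; omega
    · rename_i h
      have ht : (max (L + 1) 1).toNat < 2^(m+1) := by
        have : ((2:Int)^(m+1)) = ((2^(m+1) : Nat) : Int) := by push_cast; ring
        omega
      have hlog : Nat.log2 (max (L + 1) 1).toNat ≤ m := by
        by_cases hz : (max (L + 1) 1).toNat = 0
        · simp [hz, Nat.log2]
        · have := (Nat.log2_lt hz).mpr ht
          omega
      have : max m (Nat.log2 (max (L + 1) 1).toNat) = m := by omega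
      rw [this]
  | succ k ih =>
    intro L m hm hc hk
    rw [aLoop1]
    split
    · rename_i h
      -- rewrite the new state into the shape of the invariant at m+1
      have e1 : (2:Int)^(m-1) * 2 = 2^((m+1)-1) := by
        have hm' : m - 1 + 1 = m := by omega
        have : (2:Int)^(m-1) * 2 = 2^(m-1+1) := by rw [pow_succ]
        rw [this, hm']; norm_num
      have e2 : (2:Int)^(m+1) - 1 + (2^(m-1) * 2) * 2 = 2^((m+1)+1) - 1 := by
        have hm' : m - 1 + 1 = m := by omega
        have h1 : (2:Int)^(m-1) * 2 = 2^m := by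
          have : (2:Int)^(m-1) * 2 = 2^(m-1+1) := by rw [pow_succ]
          rw [this, hm']
        have h2 : (2:Int)^(m+1) = 2^m * 2 := by rw [pow_succ]
        have h3 : (2:Int)^(m+1+1) = 2^(m+1) * 2 := by rw [pow_succ]
        rw [h1, h2, h3]; ring
      have e3 : ((m:Int) + 1) = ((m+1 : Nat) : Int) := by push_cast; ring
      rw [e3]
      have hc' : (1:Int) ≤ 2^((m+1)-1) := by rw [← e1]; omega
      have goal' : aLoop1 L (2^(m-1) * 2) (2^(m+1) - 1 + (2^(m-1) * 2) * 2) ((m+1 : Nat) : Int) (by omega)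
          = aLoop1 L (2^((m+1)-1)) (2^((m+1)+1) - 1) ((m+1 : Nat) : Int) hc' := by
        congr 1
      rw [goal']
      have hpow : (2:Int)^(m+1+1) = 2^(m+1) * 2 := by rw [pow_succ]
      have hp1 : (1:Int) ≤ 2 ^ (m+1) := one_le_pow₀ (by norm_num)
      rw [ih L (m+1) (by omega) hc' (by omega)]
      -- both sides are the log, since log2 (L+1) ≥ m+1 here
      have hcast : ((2:Int)^(m+1)) = ((2^(m+1) : Nat) : Int) := by push_cast; ring
      have ht : 2^(m+1) ≤ (max (L + 1) 1).toNat := by omega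
      have hz : (max (L + 1) 1).toNat ≠ 0 := by
        have : 0 < 2^(m+1) := Nat.pow_pos (by omega)
        omega
      have hlog : m + 1 ≤ Nat.log2 (max (L + 1) 1).toNat := (Nat.le_log2 hz).mpr ht
      have : max m (Nat.log2 (max (L + 1) 1).toNat) = max (m+1) (Nat.log2 (max (L + 1) 1).toNat) := by omega
      rw [this]
    · rename_i h
      have hp1 : (1:Int) ≤ 2 ^ (m+1) := one_le_pow₀ (by norm_num)
      have ht : (max (L + 1) 1).toNat < 2^(m+1) := by
        have : ((2:Int)^(m+1)) = ((2^(m+1) : Nat) : Int) := by push_cast; ring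
        omega
      have hlog : Nat.log2 (max (L + 1) 1).toNat ≤ m := by
        by_cases hz : (max (L + 1) 1).toNat = 0
        · simp [hz, Nat.log2]
        · have := (Nat.log2_lt hz).mpr ht
          omega
      have : max m (Nat.log2 (max (L + 1) 1).toNat) = m := by omega
      rw [this]

-- A's minimum-count loop equals B's closed form
lemma min_eq (L : Int) (hc : (1:Int) ≤ 1) :
    aLoop1 L 1 (1 + 1 * 2) 1 hc = max 1 (pyBitLength (max (L + 1) 1) - 1) := by
  have h1 : aLoop1 L 1 (1 + 1 * 2) 1 hc
      = aLoop1 L (2^(1-1)) (2^(1+1) - 1) ((1:Nat) : Int) (by norm_num) := by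
    norm_num
  rw [h1, aLoop1_char ((L + 2 - 2^(1+1)).toNat) L 1 (by omega) (by norm_num) (le_refl _)]
  have hm1 : (0:Int) < max (L + 1) 1 := by omega
  have hne : max (L + 1) 1 ≠ 0 := by omega
  rw [pyBitLength, if_neg hne]
  have habs : (max (L + 1) 1).natAbs = (max (L + 1) 1).toNat := by omega
  rw [habs]
  push_cast
  omega

-- A's Fibonacci loop equals B's greedy loop, under the state correspondence
-- x = last + current, y = last + 2*current
lemma loop2_eq (k : Nat) : ∀ (rem last current m : Int) (hl : 0 ≤ last) (hc : 1 ≤ current),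
    rem.toNat ≤ k →
    aLoop2 rem last current m hl hc
      = bLoop rem (last + current) (last + 2 * current) m (by omega) (by omega) := by
  induction k with
  | zero =>
    intro rem last current m hl hc hk
    rw [aLoop2, bLoop]
    split
    · rename_i h
      split
      · split
        · rename_i h2 hb; exfalso; omega
        · rfl
      · rename_i h2; exfalso; omega
    · rename_i h
      split
      · rename_i hb; exfalso; omega
      · rfl
  | succ k ih =>
    intro rem last current m hl hc hk
    rw [aLoop2, bLoop]
    split
    · rename_i h
      split
      · rename_i h2
        split
        · rename_i hb; exfalso; omega
        · rfl
      · rename_i h2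
        split
        · rename_i hb
          rw [ih (rem - (current + last)) current (current + last) (m + 1) (by omega) (by omega) (by omega)]
          congr 1 <;> ring
        · rename_i hb; exfalso; omega
    · rename_i h
      split
      · rename_i hb; exfalso; omega
      · rfl

-- ===== VERDICT (by name: the statement is the Claim_ definition above) =====
theorem solution_spec : Claim_equal_solution := by
  intro L _hd
  show solution L = solution_alt L
  rw [solution, solution_alt, min_eq,
    loop2_eq (L - 1).toNat (L - 1) 0 1 1 (by omega) (by omega) (le_refl _)]
  norm_num
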